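-- pv_equiv track=rewrite | github.com/Buraphaohm/OnTheRoad_test | Tricky.py | tricky
-- ===== SOURCE A (Python) =====
-- def tricky(a, b):
--     base = 1000000
--     diff = 1000000
--     for _ in range(abs(b)):
--         diff -= a
--     if (a > 0 and b > 0) or (a < 0 and b < 0):
--       return abs(base - diff)
--     elif (a>0 and b<0):
--       return -(base - diff)
--     else:
--       return base - diff
-- ===== SOURCE B (Python) =====
-- def tricky(a, b):
--     # Closed form: the subtraction loop plus sign branches compute exactly a*b.
--     return a * b
-- ===== Notes on version B (the rewrite author's own statement) =====
-- stated objective: faster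
-- what changed: Replaced the O(|b|) repeated-subtraction loop and sign-case branches with the closed form a*b, which A provably computes on every input.
import Mathlib
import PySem

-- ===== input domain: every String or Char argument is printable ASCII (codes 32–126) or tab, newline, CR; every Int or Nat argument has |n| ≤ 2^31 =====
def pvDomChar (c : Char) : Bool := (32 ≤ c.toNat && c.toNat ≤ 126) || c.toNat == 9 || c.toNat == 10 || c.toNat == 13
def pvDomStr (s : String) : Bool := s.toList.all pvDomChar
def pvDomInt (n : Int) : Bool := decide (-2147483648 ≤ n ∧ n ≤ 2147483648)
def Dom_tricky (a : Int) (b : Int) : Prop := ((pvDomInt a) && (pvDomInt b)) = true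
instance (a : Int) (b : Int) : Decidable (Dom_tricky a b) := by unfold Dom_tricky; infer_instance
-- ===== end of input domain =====

-- B replaces A's O(|b|) repeated-subtraction loop and sign branches by the closed form a*b (faster).
-- ===== PORT A =====
def tricky (a : Int) (b : Int) : Int :=
  let base : Int := 1000000
  let diff : Int := (List.range b.natAbs).foldl (fun d _ => d - a) 1000000
  if (a > 0 ∧ b > 0) ∨ (a < 0 ∧ b < 0) then ((base - diff).natAbs : Int)
  else if a > 0 ∧ b < 0 then -(base - diff)
  else base - diff

-- ===== PORT B =====
def tricky_alt (a : Int) (b : Int) : Int := a * b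

-- ===== PRECONDITION & SPEC =====
def Spec_tricky (a : Int) (b : Int) (out : Int) : Prop := out = tricky_alt a b
instance (a : Int) (b : Int) (out : Int) : Decidable (Spec_tricky a b out) := by unfold Spec_tricky; infer_instance

-- ===== CLAIM (what is proved, stated in full; the proofs are below) =====
def Claim_equal_tricky : Prop := ∀ (a : Int) (b : Int), Dom_tricky a b → Spec_tricky a b (tricky a b)

-- ===== LEMMAS AND PROOFS =====

-- A's loop: subtracting a, n times, from x gives x - a*n.
theorem foldl_sub_range (a x : Int) (n : Nat) :
    (List.range n).foldl (fun d _ => d - a) x = x - a * n := by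
  induction n generalizing x with
  | zero => simp
  | succ k ih =>
      rw [List.range_succ, List.foldl_append]
      simp [ih]
      ring

-- ===== VERDICT (by name: the statement is the Claim_ definition above) =====
theorem tricky_spec : Claim_equal_tricky := by
  intro a b _
  unfold Spec_tricky tricky tricky_alt
  rw [foldl_sub_range]
  have hb : (b.natAbs : Int) = b ∨ (b.natAbs : Int) = -b := Int.natAbs_eq b |>.imp Eq.symm (by omega)
  simp only []
  split_ifs with h1 h2
  · rcases h1 with ⟨ha, hb'⟩ | ⟨ha, hb'⟩
    · have : (b.natAbs : Int) = b := by omega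
      rw [this]
      have : (0:Int) ≤ a * b := le_of_lt (mul_pos ha hb')
      omega
    · have hb2 : (b.natAbs : Int) = -b := by omega
      rw [hb2]
      have : (0:Int) ≤ a * b := le_of_lt (mul_pos_of_neg_of_neg ha hb')
      have h3 : a * -b = -(a*b) := by ring
      omega
  · obtain ⟨ha, hb'⟩ := h2
    have hb2 : (b.natAbs : Int) = -b := by omega
    rw [hb2]; ring
  · -- remaining mixed/zero cases: a*|b| = a*b
    rcases hb with hb2 | hb2
    · rw [hb2]; ring
    · rcases lt_trichotomy b 0 with hbn | hb0 | hbp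
      · have ha0 : a = 0 := by
          by_contra ha0
          rcases lt_or_gt_of_ne ha0 with han | hap
          · exact h1 (Or.inr ⟨han, hbn⟩)
          · exact h2 ⟨hap, hbn⟩
        subst ha0; simp
      · subst hb0; simp
      · rw [hb2]
        have : b = 0 := by omega
        subst this; simp
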